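-- pv_equiv track=rewrite | github.com/Pawan-Bhatt/Leetcode_solution | Next element with greater frequency - GFG/next-element-with-greater-frequency.py | print_next_greater_freq
-- ===== SOURCE A (Python) =====
-- from collections import Counter
--
-- def print_next_greater_freq(arr,n):
--     c = Counter(arr)
--
--     idx = [-1]*n
--
--     stack = []
--     for i, v in enumerate(arr):
--         if not stack:
--             stack.append(i)
--         else:
--             cur_freq = c[v]
--             while stack:
--                 last_idx = stack[-1]
--                 last_freq = c[arr[last_idx]]
--                 if last_freq < cur_freq:
--                     idx[last_idx] = v
--                     stack = stack[:len(stack)-1]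
--                 else:
--                     break
--             stack.append(i)
--
--     return idx
-- ===== SOURCE B (Python) =====
-- from collections import Counter
--
-- def print_next_greater_freq(arr, n):
--     c = Counter(arr)
--     idx = [-1] * n
--     for i in range(len(arr)):
--         cur = c[arr[i]]
--         for j in range(i + 1, len(arr)):
--             if c[arr[j]] > cur:
--                 idx[i] = arr[j]
--                 break
--     return idx
-- ===== Notes on version B (the rewrite author's own statement) =====
-- stated objective: simpler
-- what changed: Replaces A's monotonic index stack (pop-and-assign while the top's frequency is smaller) with a direct per-position rightward scan for the first strictly-greater-frequency element, using the same Counter.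
import Mathlib
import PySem

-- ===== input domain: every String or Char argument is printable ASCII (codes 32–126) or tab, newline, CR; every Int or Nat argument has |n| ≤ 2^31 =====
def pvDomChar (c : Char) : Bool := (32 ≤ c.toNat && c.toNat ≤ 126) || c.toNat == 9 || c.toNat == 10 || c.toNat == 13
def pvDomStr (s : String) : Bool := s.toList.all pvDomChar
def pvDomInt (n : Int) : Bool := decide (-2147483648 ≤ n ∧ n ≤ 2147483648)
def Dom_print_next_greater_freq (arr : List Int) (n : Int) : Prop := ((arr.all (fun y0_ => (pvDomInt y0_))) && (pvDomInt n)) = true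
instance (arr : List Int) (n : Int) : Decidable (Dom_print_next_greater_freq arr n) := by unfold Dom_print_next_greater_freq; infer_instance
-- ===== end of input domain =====

-- B replaces A's monotonic-stack pass with a plain Counter + direct scan-right-for-the-first-higher-frequency
-- element per position (objective: simpler); both ports agree on every input admitted by Pre_.

-- ===== PORT A =====
-- the inner 'while stack:' loop of A: pops while the top's frequency is below cur_freq,
-- writing idx[last_idx] = v for each popped index (idx[i] via pySetD: in-range on Pre_)
def aPop (arr : List Int) (c : PySem.Dict Int Int) (v cf : Int) :
    List Int → List Int → List Int × List Int
  | idx, [] => (idx, [])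
  | idx, last :: rest =>
    let lastFreq := c.getD (PySem.List.pyGetD arr last 0) 0
    if lastFreq < cf then aPop arr c v cf (PySem.List.pySetD idx last v) rest
    else (idx, last :: rest)

-- the Python stack has its top at the end; the port keeps the top at the HEAD of the list
-- (append = cons, stack[:-1] = tail), the same state read the same way
def print_next_greater_freq (arr : List Int) (n : Int) : List Int :=
  let c := PySem.Dict.counter arr
  let idx0 : List Int := List.replicate n.toNat (-1)
  let st := (PySem.List.enumerate arr).foldl (fun st iv =>
    match st.2 with
    | [] => (st.1, [iv.1])
    | _ :: _ =>
      let cf := c.getD iv.2 0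
      let r := aPop arr c iv.2 cf st.1 st.2
      (r.1, iv.1 :: r.2)) (idx0, ([] : List Int))
  st.1

-- ===== PORT B =====
-- Source B's inner 'for j in range(i+1, len(arr))' with break: first value to the right with greater frequency
def bFind (arr : List Int) (c : PySem.Dict Int Int) (cur : Int) : List Int → Option Int
  | [] => none
  | j :: js =>
    let x := PySem.List.pyGetD arr j 0
    if c.getD x 0 > cur then some x else bFind arr c cur js

def print_next_greater_freq_alt (arr : List Int) (n : Int) : List Int :=
  let c := PySem.Dict.counter arr
  (PySem.List.pyRange 0 arr.length 1).foldl (fun idx i =>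
    let cur := c.getD (PySem.List.pyGetD arr i 0) 0
    match bFind arr c cur (PySem.List.pyRange (i + 1) arr.length 1) with
    | some x => PySem.List.pySetD idx i x
    | none => idx) (List.replicate n.toNat (-1))

-- ===== PRECONDITION & SPEC =====
-- frequency of the element at position i (0 if out of range; only used at i < arr.length)
def pnF (arr : List Int) (i : Nat) : Int := (arr.count (arr.getD i 0) : Int)

-- Pre_ excludes exactly the inputs on which the Python A raises IndexError: some position i that has a
-- later element of strictly greater frequency (so idx[i] gets written) lies at or beyond n.
def Pre_print_next_greater_freq (arr : List Int) (n : Int) : Prop :=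
  ∀ i < arr.length, (∃ j < arr.length, i < j ∧ pnF arr i < pnF arr j) → (i : Int) < n

instance (arr : List Int) (n : Int) : Decidable (Pre_print_next_greater_freq arr n) := by
  unfold Pre_print_next_greater_freq; infer_instance

def pvWitness_print_next_greater_freq : List Int × Int := ([1, 2, 2, 3, 2, 1], 6)

def Spec_print_next_greater_freq (arr : List Int) (n : Int) (out : List Int) : Prop := out = print_next_greater_freq_alt arr n
instance (arr : List Int) (n : Int) (out : List Int) : Decidable (Spec_print_next_greater_freq arr n out) := by unfold Spec_print_next_greater_freq; infer_instance

-- ===== CLAIM (what is proved, stated in full; the proofs are below) =====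
def Claim_equal_print_next_greater_freq : Prop := ∀ (arr : List Int) (n : Int), Dom_print_next_greater_freq arr n → Pre_print_next_greater_freq arr n → Spec_print_next_greater_freq arr n (print_next_greater_freq arr n)

-- ===== LEMMAS AND PROOFS =====
-- (the two ports in fact agree on ALL inputs: the kernel proof never needs Pre_, which only marks
--  where the Python A/B raise while the total Lean ports still return)

-- p has no strictly-greater-frequency element in positions (p, k)
def pnOk (arr : List Int) (p k : Nat) : Bool :=
  decide (∀ q < k, p < q → ¬ (pnF arr p < pnF arr q))

-- position of the first strictly-greater-frequency element to the right of p, if any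
def pnNxt (arr : List Int) (p : Nat) : Option Nat :=
  (List.range' (p + 1) (arr.length - (p + 1))).find? (fun j => decide (pnF arr p < pnF arr j))

-- the value slot p holds after the first k elements have been processed
def pnExp (arr : List Int) (p k : Nat) : Int :=
  match pnNxt arr p with
  | some j => if j < k then arr.getD j 0 else -1
  | none => -1

def pnIdxSpec (arr : List Int) (n : Int) (k : Nat) : List Int :=
  (List.range n.toNat).map (fun p => pnExp arr p k)

def pnStackSpec (arr : List Int) (k : Nat) : List Int :=
  (((List.range k).filter (fun p => pnOk arr p k)).reverse).map (fun p : Nat => (p : Int))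

lemma pnRange_cast (a b : Nat) :
    PySem.List.pyRange (a : Int) (b : Int) 1 = (List.range' a (b - a)).map (fun k : Nat => (k : Int)) := by
  by_cases h : a < b
  · obtain ⟨d, rfl⟩ : ∃ d, b = a + (d + 1) := ⟨b - a - 1, by omega⟩
    induction d generalizing a with
    | zero =>
      rw [PySem.List.pyRange_one_cons (by exact_mod_cast h)]
      rw [PySem.List.pyRange_one_eq_nil (by push_cast; omega)]
      have : a + (0 + 1) - a = 1 := by omega
      rw [this]
      simp [List.range']
    | succ d ih =>
      rw [PySem.List.pyRange_one_cons (by exact_mod_cast h)]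
      have h2 : (a : Int) + 1 = ((a + 1 : Nat) : Int) := by push_cast; ring
      have h3 : ((a + (d + 1 + 1) : Nat) : Int) = ((a + 1 + (d + 1) : Nat) : Int) := by push_cast; ring
      rw [h2, h3, ih (a + 1) (by omega)]
      have h4 : a + (d + 1 + 1) - a = (d + 1) + 1 := by omega
      have h5 : a + 1 + (d + 1) - (a + 1) = d + 1 := by omega
      rw [h4, h5]
      conv_rhs => rw [List.range'_succ]
      simp
  · rw [PySem.List.pyRange_one_eq_nil (by exact_mod_cast (by omega : (b : Int) ≤ a))]
    have : b - a = 0 := by omega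
    simp [this]

lemma find?_range'_eq_some_iff (s len : Nat) (p : Nat → Bool) (j : Nat) :
    (List.range' s len).find? p = some j ↔
      (s ≤ j ∧ j < s + len ∧ p j = true ∧ ∀ m, s ≤ m → m < j → p m = false) := by
  induction len generalizing s with
  | zero => simp; omega
  | succ len ih =>
    rw [List.range'_succ, List.find?_cons]
    by_cases hp : p s
    · simp [hp]
      constructor
      · rintro rfl
        exact ⟨le_refl _, by omega, hp, fun m h1 h2 => absurd h1 (by omega)⟩
      · rintro ⟨h1, h2, h3, h4⟩
        by_contra hne
        have := h4 s (le_refl _) (by omega)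
        rw [hp] at this; exact absurd this (by simp)
    · simp only [hp]
      rw [ih (s + 1)]
      constructor
      · rintro ⟨h1, h2, h3, h4⟩
        refine ⟨by omega, by omega, h3, fun m hm1 hm2 => ?_⟩
        rcases Nat.eq_or_lt_of_le hm1 with rfl | h
        · simpa using hp
        · exact h4 m h hm2
      · rintro ⟨h1, h2, h3, h4⟩
        have hsj : s ≠ j := by rintro rfl; rw [h3] at hp; simp at hp
        exact ⟨by omega, by omega, h3, fun m hm1 hm2 => h4 m (by omega) hm2⟩

lemma takeWhile_eq_filter_of_pairwise {l : List Nat} {p : Nat → Bool}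
    (h : l.Pairwise (fun a b => p b = true → p a = true)) :
    l.takeWhile p = l.filter p ∧ l.dropWhile p = l.filter (fun x => !p x) := by
  induction l with
  | nil => simp
  | cons a t ih =>
    rw [List.pairwise_cons] at h
    obtain ⟨ha, ht⟩ := h
    obtain ⟨ih1, ih2⟩ := ih ht
    by_cases hp : p a
    · simp [hp, ih1, ih2]
    · have hall : ∀ b ∈ t, p b = false := by
        intro b hb
        by_contra hc
        exact hp (ha b hb (by simpa using hc))
      have hf : t.filter p = [] := List.filter_eq_nil_iff.mpr (by intro b hb; simp [hall b hb])
      have hf2 : t.filter (fun x => !p x) = t := List.filter_eq_self.mpr (by intro b hb; simp [hall b hb])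
      simp [hp, hf, hf2]

lemma foldl_set_length (v : Int) (ps : List Nat) (idx : List Int) :
    (ps.foldl (fun id p => id.set p v) idx).length = idx.length := by
  induction ps generalizing idx with
  | nil => rfl
  | cons a t ih => simp [List.foldl_cons, ih]

lemma foldl_set_getD (v : Int) (ps : List Nat) (idx : List Int) (q : Nat)
    (hq : q < idx.length) :
    (ps.foldl (fun id p => id.set p v) idx).getD q 0 = if q ∈ ps then v else idx.getD q 0 := by
  induction ps generalizing idx with
  | nil => simp
  | cons a t ih =>
    rw [List.foldl_cons, ih _ (by simpa using hq)]
    by_cases hqt : q ∈ t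
    · simp [hqt]
    · simp only [List.mem_cons, hqt, or_false]
      by_cases hqa : q = a
      · subst hqa
        simp [List.getD_eq_getElem?_getD, hq]
      · simp [List.getD_eq_getElem?_getD, hqa, Ne.symm hqa]

lemma aPop_map (arr : List Int) (c : PySem.Dict Int Int) (v cf : Int) (u : List Nat) (idx : List Int) :
    aPop arr c v cf idx (u.map (fun p : Nat => (p : Int))) =
      ((u.takeWhile (fun p => decide (c.getD (arr.getD p 0) 0 < cf))).foldl (fun id p => id.set p v) idx,
       (u.dropWhile (fun p => decide (c.getD (arr.getD p 0) 0 < cf))).map (fun p : Nat => (p : Int))) := by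
  induction u generalizing idx with
  | nil => simp [aPop]
  | cons a t ih =>
    simp only [List.map_cons, aPop, PySem.List.pyGetD_natCast, PySem.List.pySetD_natCast,
      List.takeWhile_cons, List.dropWhile_cons]
    by_cases hp : c.getD (arr.getD a 0) 0 < cf
    · rw [if_pos hp, if_pos (by simpa using hp), if_pos (by simpa using hp), List.foldl_cons, ih]
    · rw [if_neg hp, if_neg (by simpa using hp), if_neg (by simpa using hp)]
      simp

lemma bFind_map (arr : List Int) (cur : Int) (u : List Nat) :
    bFind arr (PySem.Dict.counter arr) cur (u.map (fun p : Nat => (p : Int))) =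
      (u.find? (fun j => decide (cur < pnF arr j))).map (fun j => arr.getD j 0) := by
  induction u with
  | nil => simp [bFind]
  | cons a t ih =>
    simp only [List.map_cons, bFind, PySem.List.pyGetD_natCast, PySem.Dict.getD_counter]
    by_cases hp : cur < pnF arr a
    · rw [List.find?_cons_of_pos (by simpa [pnF] using hp), if_pos (by simpa [pnF] using hp)]
      simp
    · rw [List.find?_cons_of_neg (by simpa [pnF] using hp), if_neg (by simpa [pnF] using hp), ih]

lemma pnOk_succ (arr : List Int) (p k : Nat) :
    pnOk arr p (k + 1) = (pnOk arr p k && ! (decide (p < k) && decide (pnF arr p < pnF arr k))) := by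
  rw [pnOk, pnOk]
  have hiff : (∀ q < k + 1, p < q → ¬ (pnF arr p < pnF arr q)) ↔
      ((∀ q < k, p < q → ¬ (pnF arr p < pnF arr q)) ∧ (p < k → ¬ (pnF arr p < pnF arr k))) :=
    ⟨fun h => ⟨fun q hq => h q (by omega), fun hpk => h k (by omega) hpk⟩,
     fun h q hq hpq => by
        rcases Nat.lt_succ_iff_lt_or_eq.mp hq with hlt | rfl
        · exact h.1 q hlt hpq
        · exact h.2 hpq⟩
  have hd : decide (∀ q < k + 1, p < q → ¬ (pnF arr p < pnF arr q)) =
      decide ((∀ q < k, p < q → ¬ (pnF arr p < pnF arr q)) ∧ (p < k → ¬ (pnF arr p < pnF arr k))) :=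
    decide_eq_decide.mpr hiff
  rw [hd]
  by_cases hB : p < k <;> by_cases hC : pnF arr p < pnF arr k <;> simp [hB, hC]

lemma pnNxt_eq_some_k (arr : List Int) (q k : Nat) (hqk : q < k) (hk : k < arr.length)
    (hok : pnOk arr q k = true) (hlt : pnF arr q < pnF arr k) :
    pnNxt arr q = some k := by
  simp only [pnOk, decide_eq_true_eq] at hok
  rw [pnNxt, find?_range'_eq_some_iff]
  exact ⟨by omega, by omega, by simpa using hlt,
    fun m h1 h2 => by simpa using hok m (by omega) (by omega)⟩

lemma pnNxt_some_props (arr : List Int) (q j : Nat) (h : pnNxt arr q = some j) :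
    q < j ∧ j < arr.length ∧ pnF arr q < pnF arr j ∧ ∀ m, q < m → m < j → ¬ (pnF arr q < pnF arr m) := by
  rw [pnNxt, find?_range'_eq_some_iff] at h
  obtain ⟨h1, h2, h3, h4⟩ := h
  exact ⟨by omega, by omega, by simpa using h3,
    fun m hm1 hm2 => by simpa using h4 m (by omega) hm2⟩

lemma pnExp_small (arr : List Int) (p k : Nat) (hk : k ≤ p + 1) : pnExp arr p k = -1 := by
  cases h : pnNxt arr p with
  | none => simp [pnExp, h]
  | some j =>
    have := (pnNxt_some_props arr p j h).1
    simp only [pnExp, h]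
    rw [if_neg (by omega)]

lemma A_inv (arr : List Int) (n : Int) (k : Nat) (hk : k ≤ arr.length) :
    ((PySem.List.enumerate arr).take k).foldl (fun st iv =>
      match st.2 with
      | [] => (st.1, [iv.1])
      | _ :: _ =>
        let cf := (PySem.Dict.counter arr).getD iv.2 0
        let r := aPop arr (PySem.Dict.counter arr) iv.2 cf st.1 st.2
        (r.1, iv.1 :: r.2)) ((List.replicate n.toNat (-1) : List Int), ([] : List Int)) =
    (pnIdxSpec arr n k, pnStackSpec arr k) := by
  induction k with
  | zero =>
    simp only [List.take_zero, List.foldl_nil, pnStackSpec, pnIdxSpec, List.range_zero,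
      List.filter_nil, List.reverse_nil, List.map_nil]
    refine Prod.ext ?_ rfl
    show List.replicate n.toNat (-1) = (List.range n.toNat).map (fun p => pnExp arr p 0)
    rw [List.map_congr_left (fun p _ => pnExp_small arr p 0 (by omega)),
      List.map_const', List.length_range]
  | succ k ih =>
    have hkL : k < arr.length := hk
    have henum : (PySem.List.enumerate arr)[k]? = some ((k : Int), arr.getD k 0) := by
      rw [PySem.List.getElem?_enumerate]
      simp [List.getElem?_eq_getElem hkL]
    rw [List.take_add_one, henum, Option.toList_some, List.foldl_append, ih (by omega),
      List.foldl_cons, List.foldl_nil]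
    by_cases hk0 : k = 0
    · subst hk0
      show (pnIdxSpec arr n 0, ([(0 : Int)] : List Int)) = (pnIdxSpec arr n 1, pnStackSpec arr 1)
      have hok : pnOk arr 0 1 = true := by
        simp only [pnOk, decide_eq_true_eq]
        intro q hq hq2; omega
      refine Prod.ext ?_ ?_
      · show pnIdxSpec arr n 0 = pnIdxSpec arr n 1
        simp only [pnIdxSpec]
        exact List.map_congr_left (fun p _ => by
          rw [pnExp_small arr p 0 (by omega), pnExp_small arr p 1 (by omega)])
      · show ([(0 : Int)] : List Int) = pnStackSpec arr 1
        simp [pnStackSpec, List.range_succ, hok]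
    · -- the stack is nonempty: k-1 is in it
      have hmem : (k - 1) ∈ (List.range k).filter (fun p => pnOk arr p k) := by
        rw [List.mem_filter]
        refine ⟨List.mem_range.mpr (by omega), ?_⟩
        simp only [pnOk, decide_eq_true_eq]
        intro q hq hq2; omega
      obtain ⟨hd, tl, hst⟩ : ∃ hd tl, pnStackSpec arr k = hd :: tl := by
        cases h : pnStackSpec arr k with
        | nil =>
          exfalso
          have hnil : (List.range k).filter (fun p => pnOk arr p k) = [] := by
            simp only [pnStackSpec, List.map_eq_nil_iff, List.reverse_eq_nil_iff] at h
            exact h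
          rw [hnil] at hmem
          simp at hmem
        | cons a b => exact ⟨a, b, rfl⟩
      rw [hst]
      show ((aPop arr (PySem.Dict.counter arr) (arr.getD k 0)
              ((PySem.Dict.counter arr).getD (arr.getD k 0) 0) (pnIdxSpec arr n k) (hd :: tl)).1,
            ((k : Int) :: (aPop arr (PySem.Dict.counter arr) (arr.getD k 0)
              ((PySem.Dict.counter arr).getD (arr.getD k 0) 0) (pnIdxSpec arr n k) (hd :: tl)).2)) =
          (pnIdxSpec arr n (k + 1), pnStackSpec arr (k + 1))
      have hcf : (PySem.Dict.counter arr).getD (arr.getD k 0) 0 = pnF arr k := by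
        rw [PySem.Dict.getD_counter]; rfl
      rw [hcf, ← hst]
      show ((aPop arr (PySem.Dict.counter arr) (arr.getD k 0) (pnF arr k) (pnIdxSpec arr n k)
              ((((List.range k).filter (fun p => pnOk arr p k)).reverse).map (fun p : Nat => (p : Int)))).1,
            ((k : Int) :: (aPop arr (PySem.Dict.counter arr) (arr.getD k 0) (pnF arr k) (pnIdxSpec arr n k)
              ((((List.range k).filter (fun p => pnOk arr p k)).reverse).map (fun p : Nat => (p : Int)))).2)) =
          (pnIdxSpec arr n (k + 1), pnStackSpec arr (k + 1))
      rw [aPop_map]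
      have hpred : (fun p : Nat => decide ((PySem.Dict.counter arr).getD (arr.getD p 0) 0 < pnF arr k)) =
          (fun p : Nat => decide (pnF arr p < pnF arr k)) := by
        funext p
        rw [PySem.Dict.getD_counter]; rfl
      rw [hpred]
      have hpw0 : ((List.range k).filter (fun p => pnOk arr p k)).Pairwise (· < ·) :=
        List.pairwise_lt_range.sublist List.filter_sublist
      have hpw : (((List.range k).filter (fun p => pnOk arr p k)).reverse).Pairwise
          (fun a b => (fun p : Nat => decide (pnF arr p < pnF arr k)) b = true →
                      (fun p : Nat => decide (pnF arr p < pnF arr k)) a = true) := by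
        rw [List.pairwise_reverse]
        refine List.Pairwise.imp_of_mem ?_ hpw0
        intro a b ha hb hab
        rw [List.mem_filter] at ha hb
        have hoka : pnOk arr a k = true := ha.2
        have hbk : b < k := List.mem_range.mp hb.1
        simp only [pnOk, decide_eq_true_eq] at hoka
        have hnab : ¬ pnF arr a < pnF arr b := hoka b hbk hab
        simp only [decide_eq_true_eq]
        intro hPa
        omega
      obtain ⟨htake, hdrop⟩ := takeWhile_eq_filter_of_pairwise hpw
      rw [htake, hdrop]
      refine Prod.ext ?_ ?_
      · -- the idx component
        show (((((List.range k).filter (fun p => pnOk arr p k)).reverse).filter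
                (fun p => decide (pnF arr p < pnF arr k))).foldl (fun id p => id.set p (arr.getD k 0))
                (pnIdxSpec arr n k)) = pnIdxSpec arr n (k + 1)
        apply List.ext_getElem
        · rw [foldl_set_length]; simp [pnIdxSpec]
        · intro q h1 h2
          have hqn : q < n.toNat := by simpa [pnIdxSpec] using h2
          have hlen : q < (pnIdxSpec arr n k).length := by simpa [pnIdxSpec] using hqn
          rw [← List.getD_eq_getElem _ 0 h1, foldl_set_getD _ _ _ _ hlen]
          by_cases hmemq : q ∈ (((List.range k).filter (fun p => pnOk arr p k)).reverse).filter
              (fun p => decide (pnF arr p < pnF arr k))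
          · rw [if_pos hmemq]
            have hq3 : q < k ∧ pnOk arr q k = true ∧ pnF arr q < pnF arr k := by
              rw [List.filter_reverse, List.mem_reverse, List.filter_filter, List.mem_filter] at hmemq
              obtain ⟨hq1, hq2⟩ := hmemq
              simp only [Bool.and_eq_true, decide_eq_true_eq] at hq2
              exact ⟨List.mem_range.mp hq1, hq2.2, hq2.1⟩
            have hnx := pnNxt_eq_some_k arr q k hq3.1 hkL hq3.2.1 hq3.2.2
            simp [pnIdxSpec, pnExp, hnx]
          · rw [if_neg hmemq]
            have hqformula : ¬ (q < k ∧ pnOk arr q k = true ∧ pnF arr q < pnF arr k) := by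
              intro hcon
              apply hmemq
              rw [List.filter_reverse, List.mem_reverse, List.filter_filter, List.mem_filter]
              exact ⟨List.mem_range.mpr hcon.1, by simp [hcon.2.1, hcon.2.2]⟩
            have hgetd : (pnIdxSpec arr n k).getD q 0 = pnExp arr q k := by
              rw [List.getD_eq_getElem _ 0 hlen]
              simp [pnIdxSpec]
            rw [hgetd]
            have hrhs : (pnIdxSpec arr n (k + 1))[q]'h2 = pnExp arr q (k + 1) := by
              simp [pnIdxSpec]
            rw [hrhs]
            cases hnq : pnNxt arr q with
            | none => simp [pnExp, hnq]
            | some j =>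
              obtain ⟨hj1, hj2, hj3, hj4⟩ := pnNxt_some_props arr q j hnq
              have hjk : j ≠ k := by
                intro hjeq
                subst hjeq
                refine hqformula ⟨by omega, ?_, hj3⟩
                simp only [pnOk, decide_eq_true_eq]
                exact fun m hm1 hm2 => hj4 m hm2 hm1
              have hiff : j < k ↔ j < k + 1 := by omega
              simp [pnExp, hnq, hiff]
      · -- the stack component
        show ((k : Int) :: ((((List.range k).filter (fun p => pnOk arr p k)).reverse).filter
                (fun x => ! decide (pnF arr x < pnF arr k))).map (fun p : Nat => (p : Int))) =
            pnStackSpec arr (k + 1)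
        have hfilt : (((List.range k).filter (fun p => pnOk arr p k)).reverse).filter
              (fun x => ! decide (pnF arr x < pnF arr k)) =
            ((List.range k).filter (fun p => pnOk arr p (k + 1))).reverse := by
          rw [List.filter_reverse, List.filter_filter]
          congr 1
          apply List.filter_congr
          intro p hp
          have hpk : p < k := List.mem_range.mp hp
          rw [pnOk_succ]
          simp [hpk, Bool.and_comm]
        rw [hfilt]
        have hokk : pnOk arr k (k + 1) = true := by
          simp only [pnOk, decide_eq_true_eq]
          intro q hq hq2; omega
        simp [pnStackSpec, List.range_succ, List.filter_append, hokk]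

lemma B_inv (arr : List Int) (n : Int) (k : Nat) (hk : k ≤ arr.length) :
    (List.range k).foldl (fun idx (i : Nat) =>
      let cur := (PySem.Dict.counter arr).getD (PySem.List.pyGetD arr (i : Int) 0) 0
      match bFind arr (PySem.Dict.counter arr) cur (PySem.List.pyRange ((i : Int) + 1) arr.length 1) with
      | some x => PySem.List.pySetD idx (i : Int) x
      | none => idx) (List.replicate n.toNat (-1)) =
    (List.range n.toNat).map (fun p => if p < k then pnExp arr p arr.length else -1) := by
  induction k with
  | zero =>
    simp only [List.range_zero, List.foldl_nil, Nat.not_lt_zero, if_false]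
    rw [List.map_const', List.length_range]
  | succ k ih =>
    rw [List.range_succ, List.foldl_append, ih (by omega), List.foldl_cons, List.foldl_nil]
    have hcur : (PySem.Dict.counter arr).getD (PySem.List.pyGetD arr (k : Int) 0) 0 = pnF arr k := by
      rw [PySem.List.pyGetD_natCast, PySem.Dict.getD_counter]; rfl
    have hrange : PySem.List.pyRange ((k : Int) + 1) arr.length 1 =
        (List.range' (k + 1) (arr.length - (k + 1))).map (fun p : Nat => (p : Int)) := by
      rw [show ((k : Int) + 1) = ((k + 1 : Nat) : Int) by push_cast; ring, pnRange_cast]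
    simp only [hcur, hrange, bFind_map]
    rw [show (List.range' (k + 1) (arr.length - (k + 1))).find?
        (fun j => decide (pnF arr k < pnF arr j)) = pnNxt arr k from rfl]
    cases hnx : pnNxt arr k with
    | none =>
      simp only [Option.map_none]
      refine List.map_congr_left (fun q hq => ?_)
      by_cases hqk : q = k
      · subst hqk
        rw [if_neg (by omega), if_pos (by omega)]
        simp [pnExp, hnx]
      · have : q < k ↔ q < k + 1 := by omega
        simp [this]
    | some j =>
      obtain ⟨hj1, hj2, hj3, hj4⟩ := pnNxt_some_props arr k j hnx
      simp only [Option.map_some, PySem.List.pySetD_natCast]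
      apply List.ext_getElem
      · simp
      · intro q h1 h2
        rw [List.getElem_set]
        simp only [List.getElem_map, List.getElem_range]
        have hqn : q < n.toNat := by simpa using h2
        by_cases hqk : k = q
        · subst hqk
          rw [if_pos rfl, if_pos (by omega)]
          simp [pnExp, hnx, hj2]
        · rw [if_neg hqk]
          have : q < k ↔ q < k + 1 := by omega
          simp [this]

-- ===== VERDICT (by name: the statement is the Claim_ definition above) =====
theorem print_next_greater_freq_spec : Claim_equal_print_next_greater_freq := by
  intro arr n _ _
  unfold Spec_print_next_greater_freq
  have hA := A_inv arr n arr.length (le_refl _)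
  rw [show (PySem.List.enumerate arr).take arr.length = PySem.List.enumerate arr from by
    conv_lhs => rw [← PySem.List.length_enumerate arr 0]
    exact List.take_length] at hA
  show print_next_greater_freq arr n = print_next_greater_freq_alt arr n
  simp only [print_next_greater_freq, print_next_greater_freq_alt]
  rw [hA]
  rw [PySem.List.pyRange_zero_natCast, List.foldl_map]
  rw [B_inv arr n arr.length (le_refl _)]
  simp only [pnIdxSpec]
  exact List.map_congr_left (fun p hp => by
    by_cases h : p < arr.length
    · rw [if_pos h]
    · rw [if_neg h, pnExp_small arr p arr.length (by omega)])
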